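-- pv_equiv track=rewrite | github.com/rankpandaseo/rankpanda-growth-system-vault | convert-yaml-to-properties.py | build_properties_frontmatter
-- ===== SOURCE A (Python) =====
-- def build_properties_frontmatter(properties):
--     """Build frontmatter with properties in correct order."""
--     order = ['name', 'description', 'type', 'status', 'foco', 'tags', 'wikilinks']
--
--     lines = ['---']
--     for key in order:
--         if key in properties:
--             value = properties[key]
--             lines.append(f"{key}: {value}")
--
--     # Add any extra properties not in standard order
--     for key, value in properties.items():
--         if key not in order:
--             lines.append(f"{key}: {value}")
--
--     lines.append('---')
--     return '\n'.join(lines)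
-- ===== SOURCE B (Python) =====
-- def build_properties_frontmatter(properties):
--     """Build frontmatter with properties in correct order (bucket pass keyed by rank)."""
--     order = ['name', 'description', 'type', 'status', 'foco', 'tags', 'wikilinks']
--     rank = {key: i for i, key in enumerate(order)}
--     buckets = {}
--     for key, value in properties.items():
--         buckets.setdefault(rank.get(key, len(order)), []).append(f"{key}: {value}")
--     lines = ['---']
--     for i in range(len(order) + 1):
--         lines.extend(buckets.get(i, []))
--     lines.append('---')
--     return '\n'.join(lines)
-- ===== Notes on version B (the rewrite author's own statement) =====
-- stated objective: alternative
-- what changed: B replaces A's two separate filtered scans (one over the fixed order list probing the dict, one over the dict skipping order keys) by a single bucket pass: each item is appended to a bucket keyed by its rank in the order list (extras get rank 7), and the buckets are concatenated in rank order.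
import Mathlib
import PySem

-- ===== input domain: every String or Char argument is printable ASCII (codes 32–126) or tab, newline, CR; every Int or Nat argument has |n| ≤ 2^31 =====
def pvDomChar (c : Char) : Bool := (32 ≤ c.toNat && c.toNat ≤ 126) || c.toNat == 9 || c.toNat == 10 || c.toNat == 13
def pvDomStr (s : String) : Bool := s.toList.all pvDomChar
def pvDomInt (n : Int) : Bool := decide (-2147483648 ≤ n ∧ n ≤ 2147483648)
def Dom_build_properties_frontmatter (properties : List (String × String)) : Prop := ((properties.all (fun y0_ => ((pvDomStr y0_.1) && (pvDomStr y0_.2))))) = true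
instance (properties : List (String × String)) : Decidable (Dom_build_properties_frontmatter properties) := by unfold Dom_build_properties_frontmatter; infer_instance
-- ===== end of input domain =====

-- B replaces A's two filtered scans (one over the fixed order list, one over the dict) by a single
-- bucket pass over the dict keyed by each key's rank in the order list; objective: alternative.

-- ===== PORT A =====
def pvOrder : List String := ["name", "description", "type", "status", "foco", "tags", "wikilinks"]

def build_properties_frontmatter (properties : List (String × String)) : String :=
  let d := PySem.Dict.ofList properties
  let lines : List String := ["---"]
  let lines := pvOrder.foldl (fun lines key =>
    if d.contains key then lines ++ [key ++ ": " ++ d.getD key ""] else lines) lines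
  let lines := d.items.foldl (fun lines kv =>
    if !(pvOrder.contains kv.1) then lines ++ [kv.1 ++ ": " ++ kv.2] else lines) lines
  PySem.Str.join "\n" (lines ++ ["---"])

-- ===== PORT B =====
def pvRank : PySem.Dict String Int :=
  PySem.Dict.ofList ((PySem.List.enumerate pvOrder).map (fun p => (p.2, p.1)))

def build_properties_frontmatter_alt (properties : List (String × String)) : String :=
  let d := PySem.Dict.ofList properties
  let buckets := d.items.foldl (fun b kv =>
      b.modify (pvRank.getD kv.1 (pvOrder.length : Int)) [] (· ++ [kv.1 ++ ": " ++ kv.2]))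
    (PySem.Dict.empty : PySem.Dict Int (List String))
  let lines := (PySem.List.pyRange 0 ((pvOrder.length : Int) + 1) 1).foldl
    (fun lines i => lines ++ buckets.getD i []) ["---"]
  PySem.Str.join "\n" (lines ++ ["---"])

-- ===== PRECONDITION & SPEC =====
def Spec_build_properties_frontmatter (properties : List (String × String)) (out : String) : Prop := out = build_properties_frontmatter_alt properties
instance (properties : List (String × String)) (out : String) : Decidable (Spec_build_properties_frontmatter properties out) := by unfold Spec_build_properties_frontmatter; infer_instance

-- ===== CLAIM (what is proved, stated in full; the proofs are below) =====
def Claim_equal_build_properties_frontmatter : Prop := ∀ (properties : List (String × String)), Dom_build_properties_frontmatter properties → Spec_build_properties_frontmatter properties (build_properties_frontmatter properties)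

-- ===== LEMMAS AND PROOFS =====

set_option maxRecDepth 8192 in
theorem pvRank_getD (k : String) : pvRank.getD k 7 =
    (if k = "name" then 0 else if k = "description" then 1 else if k = "type" then 2
     else if k = "status" then 3 else if k = "foco" then 4 else if k = "tags" then 5
     else if k = "wikilinks" then 6 else 7) := by
  have hR : pvRank = PySem.Dict.mk [("name",0),("description",1),("type",2),("status",3),("foco",4),("tags",5),("wikilinks",6)] := by decide
  rw [hR, PySem.Dict.getD_eq_get?_getD]
  simp only [PySem.Dict.get?_mk_cons]
  split_ifs <;> simp_all <;> rfl

theorem pv_cond0 (k : String) : (pvRank.getD k 7 == (0:Int)) = (k == "name") := by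
  rw [pvRank_getD]; split_ifs <;> simp_all
theorem pv_cond1 (k : String) : (pvRank.getD k 7 == (1:Int)) = (k == "description") := by
  rw [pvRank_getD]; split_ifs <;> simp_all
theorem pv_cond2 (k : String) : (pvRank.getD k 7 == (2:Int)) = (k == "type") := by
  rw [pvRank_getD]; split_ifs <;> simp_all
theorem pv_cond3 (k : String) : (pvRank.getD k 7 == (3:Int)) = (k == "status") := by
  rw [pvRank_getD]; split_ifs <;> simp_all
theorem pv_cond4 (k : String) : (pvRank.getD k 7 == (4:Int)) = (k == "foco") := by
  rw [pvRank_getD]; split_ifs <;> simp_all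
theorem pv_cond5 (k : String) : (pvRank.getD k 7 == (5:Int)) = (k == "tags") := by
  rw [pvRank_getD]; split_ifs <;> simp_all
theorem pv_cond6 (k : String) : (pvRank.getD k 7 == (6:Int)) = (k == "wikilinks") := by
  rw [pvRank_getD]; split_ifs <;> simp_all

theorem pv_cond7 (k : String) : (pvRank.getD k 7 == (7:Int)) = !(pvOrder.contains k) := by
  rw [pvRank_getD]; split_ifs <;> simp_all [pvOrder]

theorem pv_filter_absent (l : List (String × String)) (k0 : String)
    (h : k0 ∉ l.map Prod.fst) : l.filter (fun kv => kv.1 == k0) = [] := by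
  rw [List.filter_eq_nil_iff]
  intro kv hkv
  simp only [beq_iff_eq]
  intro he
  exact h (he ▸ List.mem_map_of_mem hkv)

theorem pv_filter_present (l : List (String × String)) (hnd : (l.map Prod.fst).Nodup)
    (k0 : String) (v : String) (hm : (k0, v) ∈ l) :
    l.filter (fun kv => kv.1 == k0) = [(k0, v)] := by
  induction l with
  | nil => cases hm
  | cons a t ih =>
    simp only [List.map_cons, List.nodup_cons] at hnd
    by_cases h : a.1 = k0
    · have hv : a = (k0, v) := by
        cases List.mem_cons.mp hm with
        | inl h' => exact h'.symm
        | inr h' => exact absurd (h ▸ List.mem_map_of_mem h') hnd.1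
      simp [hv, pv_filter_absent t k0 (h ▸ hnd.1)]
    · have hm' : (k0, v) ∈ t := by
        cases List.mem_cons.mp hm with
        | inl h' => exact absurd (congrArg Prod.fst h'.symm) h
        | inr h' => exact h'
      simp [h, ih hnd.2 hm']

theorem pv_filter_key (d : PySem.Dict String String) (hnd : d.keys.Nodup) (k0 : String) :
    (d.items.filter (fun kv => kv.1 == k0)).map (fun kv => kv.1 ++ ": " ++ kv.2) =
      if d.contains k0 then [k0 ++ ": " ++ d.getD k0 ""] else [] := by
  cases hv : d.get? k0 with
  | none =>
    have hc : d.contains k0 = false := by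
      rw [PySem.Dict.contains_eq_isSome_get?, hv]; rfl
    rw [pv_filter_absent _ _ ((PySem.Dict.get?_eq_none_iff_not_mem_keys d k0).mp hv), hc]
    simp
  | some v =>
    have hc : d.contains k0 = true := by
      rw [PySem.Dict.contains_eq_isSome_get?, hv]; rfl
    rw [pv_filter_present d.items hnd k0 v (PySem.Dict.mem_items_of_get?_eq_some d hv), hc,
      PySem.Dict.getD_of_get?_eq_some d "" hv]
    simp

theorem pv_filter_map_flatMap {a b : Type} (ks : List a) (p : a -> Bool) (f : a -> b) :
    (ks.filter p).map f = ks.flatMap (fun k => if p k then [f k] else []) := by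
  induction ks with
  | nil => rfl
  | cons x t ih =>
    by_cases h : p x <;> simp [h, ih]

theorem pv_lines (d : PySem.Dict String String) (hnd : d.keys.Nodup) :
    d.items.foldl (fun lines kv => if !(pvOrder.contains kv.1) then lines ++ [kv.1 ++ ": " ++ kv.2] else lines)
      (pvOrder.foldl (fun lines key => if d.contains key then lines ++ [key ++ ": " ++ d.getD key ""] else lines) (["---"] : List String))
    = (PySem.List.pyRange 0 ((pvOrder.length : Int) + 1) 1).foldl
        (fun lines i => lines ++ (d.items.foldl (fun b kv => b.modify (pvRank.getD kv.1 (pvOrder.length : Int)) [] (· ++ [kv.1 ++ ": " ++ kv.2])) (PySem.Dict.empty : PySem.Dict Int (List String))).getD i []) ["---"] := by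
  have hlen : (pvOrder.length : Int) = 7 := by rfl
  rw [hlen]
  rw [PySem.List.foldl_append_if, PySem.List.foldl_append_if]
  have hr : PySem.List.pyRange 0 (7 + 1) 1 = [0,1,2,3,4,5,6,7] := by decide
  rw [hr]
  simp only [List.foldl_cons, List.foldl_nil]
  rw [show (d.items.foldl (fun b kv => b.modify (pvRank.getD kv.1 7) [] (· ++ [kv.1 ++ ": " ++ kv.2])) (PySem.Dict.empty : PySem.Dict Int (List String)))
      = ((d.items.map (fun kv => (pvRank.getD kv.1 7, kv.1 ++ ": " ++ kv.2))).foldl (fun b p => b.modify p.1 [] (· ++ [p.2])) PySem.Dict.empty)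
    by rw [List.foldl_map]]
  simp only [PySem.Dict.getD_foldl_modify_append, PySem.Dict.getD_empty, List.nil_append,
    List.filter_map, List.map_map, Function.comp_def]
  simp only [pv_cond0, pv_cond1, pv_cond2, pv_cond3, pv_cond4, pv_cond5, pv_cond6, pv_cond7]
  simp only [pv_filter_key d hnd]
  rw [pv_filter_map_flatMap]
  simp [pvOrder, List.append_assoc]

-- ===== VERDICT (by name: the statement is the Claim_ definition above) =====
theorem build_properties_frontmatter_spec : Claim_equal_build_properties_frontmatter := by
  intro properties _
  exact congrArg (PySem.Str.join "\n") (congrArg (· ++ ["---"])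
    (pv_lines (PySem.Dict.ofList properties) (PySem.Dict.nodup_keys_ofList properties)))
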